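-- pv_equiv track=rewrite | github.com/SimonaSfetcu/chipers-encryption-decryption | keyword_cipher.py | keyword_decipher
-- ===== SOURCE A (Python) =====
-- def keyword_decipher(text, key):
--     """
--     Decrypts the given text using the Keyword cipher with the provided key.
--
--     Parameters:
--         text (str): The text to be decrypted.
--         key (str): The decryption key.
--
--     Returns:
--         str: The decrypted text.
--     """
--     if not text or not key:
--         raise ValueError("Text and key must not be empty.")
--
--     result = ""
--     key_length = len(key)
--     key = key.upper()
--     for char in text:
--         if char.isalpha():
--             if char.isupper():
--                 result += chr((ord(char) - 65 - (ord(key[(ord(char) - 65) % key_length]) - 65)) % 26 + 65)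
--             else:
--                 result += chr((ord(char) - 97 - (ord(key[(ord(char) - 97) % key_length]) - 97)) % 26 + 97)
--         else:
--             result += char
--     return result
-- ===== SOURCE B (Python) =====
-- def keyword_decipher(text, key):
--     """Build a codepoint->codepoint substitution dict once, then one str.translate sweep."""
--     if not text or not key:
--         raise ValueError("Text and key must not be empty.")
--
--     key_length = len(key)
--     key = key.upper()
--     table = {}
--     for i in range(26):
--         s = ord(key[i % key_length])
--         table[65 + i] = 65 + (i - (s - 65)) % 26
--         table[97 + i] = 97 + (i - (s - 97)) % 26
--     return text.translate(table)
-- ===== Notes on version B (the rewrite author's own statement) =====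
-- stated objective: faster
-- what changed: B builds a 52-entry codepoint-to-codepoint substitution dict in one 26-step loop and then performs the whole decryption with a single str.translate call, so there is no per-character Python branching, arithmetic or concatenation at all; A recomputes the shift formula and appends inside a per-character loop.
import Mathlib
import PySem

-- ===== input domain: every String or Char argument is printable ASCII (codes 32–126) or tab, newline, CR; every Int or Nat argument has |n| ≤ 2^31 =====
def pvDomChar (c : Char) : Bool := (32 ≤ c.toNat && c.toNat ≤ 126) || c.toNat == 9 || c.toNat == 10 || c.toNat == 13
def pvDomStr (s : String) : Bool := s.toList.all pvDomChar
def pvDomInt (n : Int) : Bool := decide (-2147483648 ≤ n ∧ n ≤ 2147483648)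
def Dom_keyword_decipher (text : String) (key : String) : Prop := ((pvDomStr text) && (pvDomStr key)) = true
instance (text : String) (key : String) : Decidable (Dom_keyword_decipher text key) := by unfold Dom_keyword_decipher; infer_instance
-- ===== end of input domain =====

-- B replaces A's per-character branch-and-shift loop by a 52-entry codepoint substitution dict
-- built once and a single translate sweep; equal output on all non-empty text/key.

-- ===== PORT A =====
-- A raises ValueError on empty text or key (excluded by Pre_); the port returns "" there.
-- key[(…) % key_length] is always in range (key ≠ "" under Pre_), so pyGetD's default 'A' is never used.
def keyword_decipher (text : String) (key : String) : String :=
  if text.toList = [] ∨ key.toList = [] then ""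
  else
    let keyLength : Int := (key.toList.length : Int)
    let keyU : List Char := PySem.Chars.upper key.toList
    let result : List Char := text.toList.foldl (fun result char =>
      if PySem.Chars.isalpha char then
        if PySem.Chars.isupper char then
          result ++ [Char.ofNat ((PySem.Int.mod ((char.toNat : Int) - 65 -
            (((PySem.List.pyGetD keyU (PySem.Int.mod ((char.toNat : Int) - 65) keyLength) 'A').toNat : Int) - 65)) 26) + 65).toNat]
        else
          result ++ [Char.ofNat ((PySem.Int.mod ((char.toNat : Int) - 97 -
            (((PySem.List.pyGetD keyU (PySem.Int.mod ((char.toNat : Int) - 97) keyLength) 'A').toNat : Int) - 97)) 26) + 97).toNat]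
      else result ++ [char]) []
    String.mk result

-- ===== PORT B =====
-- The dict loop over range(26) is a foldl inserting the two fresh keys 65+i, 97+i; str.translate
-- maps each character through the dict (hit → replacement codepoint, miss → character unchanged).
def keyword_decipher_alt (text : String) (key : String) : String :=
  if text.toList = [] ∨ key.toList = [] then ""
  else
    let keyLength : Int := (key.toList.length : Int)
    let keyU : List Char := PySem.Chars.upper key.toList
    let table : PySem.Dict Int Int :=
      (PySem.List.pyRange 0 26).foldl (fun d i =>
        let s : Int := ((PySem.List.pyGetD keyU (PySem.Int.mod i keyLength) 'A').toNat : Int)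
        (d.insert (65 + i) (65 + PySem.Int.mod (i - (s - 65)) 26)).insert
          (97 + i) (97 + PySem.Int.mod (i - (s - 97)) 26)) PySem.Dict.empty
    String.mk (text.toList.map (fun c =>
      ((table.get? (c.toNat : Int)).map (fun v => Char.ofNat v.toNat)).getD c))

-- ===== PRECONDITION & SPEC =====
-- Pre_ excludes exactly the inputs on which A raises ValueError: empty text or empty key.
def Pre_keyword_decipher (text : String) (key : String) : Prop :=
  text.toList ≠ [] ∧ key.toList ≠ []
instance (text : String) (key : String) : Decidable (Pre_keyword_decipher text key) := by
  unfold Pre_keyword_decipher; infer_instance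

def pvWitness_keyword_decipher : String × String := ("Hello, World!", "Key")

def Spec_keyword_decipher (text : String) (key : String) (out : String) : Prop := out = keyword_decipher_alt text key
instance (text : String) (key : String) (out : String) : Decidable (Spec_keyword_decipher text key out) := by unfold Spec_keyword_decipher; infer_instance

-- ===== CLAIM =====
def Claim_equal_keyword_decipher : Prop := ∀ (text : String) (key : String), Dom_keyword_decipher text key → Pre_keyword_decipher text key → Spec_keyword_decipher text key (keyword_decipher text key)

-- ===== LEMMAS AND PROOFS =====
set_option maxRecDepth 8000

-- shift source: ord of the key letter selected by alphabet index i (proof-only helper)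
def SS (keyU : List Char) (keyLength : Int) (i : Int) : Int :=
  ((PySem.List.pyGetD keyU (PySem.Int.mod i keyLength) 'A').toNat : Int)

-- the per-character value A's loop computes (proof-only helper)
def fA (keyU : List Char) (keyLength : Int) (c : Char) : Char :=
  if PySem.Chars.isalpha c then
    if PySem.Chars.isupper c then
      Char.ofNat ((PySem.Int.mod ((c.toNat : Int) - 65 - (SS keyU keyLength ((c.toNat : Int) - 65) - 65)) 26) + 65).toNat
    else
      Char.ofNat ((PySem.Int.mod ((c.toNat : Int) - 97 - (SS keyU keyLength ((c.toNat : Int) - 97) - 97)) 26) + 97).toNat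
  else c

-- B's dict-building step (proof-only helper; defeq to the lambda in the port)
def stepB (keyU : List Char) (keyLength : Int) (d : PySem.Dict Int Int) (i : Int) : PySem.Dict Int Int :=
  (d.insert (65 + i) (65 + PySem.Int.mod (i - (SS keyU keyLength i - 65)) 26)).insert
    (97 + i) (97 + PySem.Int.mod (i - (SS keyU keyLength i - 97)) 26)

lemma char_le_iff (a b : Char) : a ≤ b ↔ a.toNat ≤ b.toNat := by
  rw [Char.le_def, UInt32.le_iff_toNat_le]; rfl

-- characterisation of the built table after processing range(0, m)
lemma tableGet (keyU : List Char) (keyLength : Int) (m : Nat) (hm : m ≤ 26) (n : Int) :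
    ((PySem.List.pyRange 0 (m : Int)).foldl (stepB keyU keyLength) PySem.Dict.empty).get? n =
      if 65 ≤ n ∧ n < 65 + m then some (65 + PySem.Int.mod ((n - 65) - (SS keyU keyLength (n - 65) - 65)) 26)
      else if 97 ≤ n ∧ n < 97 + m then some (97 + PySem.Int.mod ((n - 97) - (SS keyU keyLength (n - 97) - 97)) 26)
      else none := by
  induction m with
  | zero =>
    rw [Nat.cast_zero, PySem.List.pyRange_one_eq_nil (by omega)]
    simp only [List.foldl_nil, PySem.Dict.get?_empty]
    rw [if_neg (by push_cast; omega), if_neg (by push_cast; omega)]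
  | succ k ih =>
    have hk : (k : Nat) ≤ 26 := by omega
    have ih' := ih hk
    have hsplit : PySem.List.pyRange 0 ((k + 1 : Nat) : Int)
        = PySem.List.pyRange 0 (k : Int) ++ [(k : Int)] := by
      have := PySem.List.pyRange_one_succ_right (a := 0) (b := (k : Int)) (by positivity)
      push_cast
      push_cast at this
      exact this
    rw [hsplit, List.foldl_append]
    simp only [List.foldl_cons, List.foldl_nil]
    rw [stepB, PySem.Dict.get?_insert, PySem.Dict.get?_insert, ih']
    by_cases h97 : n = 97 + (k : Int)
    · rw [if_pos h97, if_neg (by push_cast; omega), if_pos (by push_cast; omega)]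
      subst h97
      have h : (97 : Int) + (k : Int) - 97 = (k : Int) := by ring
      rw [h]
    · rw [if_neg h97]
      by_cases h65 : n = 65 + (k : Int)
      · rw [if_pos h65, if_pos (by push_cast; omega)]
        subst h65
        have h : (65 : Int) + (k : Int) - 65 = (k : Int) := by ring
        rw [h]
      · rw [if_neg h65]
        by_cases hu : 65 ≤ n ∧ n < 65 + (k : Nat)
        · rw [if_pos hu, if_pos (by push_cast at hu ⊢; omega)]
        · rw [if_neg hu]
          by_cases hl : 97 ≤ n ∧ n < 97 + (k : Nat)
          · rw [if_pos hl, if_neg (by push_cast at hu ⊢; omega), if_pos (by push_cast at hl ⊢; omega)]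
          · rw [if_neg hl, if_neg (by push_cast at hu ⊢; omega), if_neg (by push_cast at hl ⊢; omega)]

-- A's per-character value equals B's table lookup, for every character
lemma perChar (keyU : List Char) (keyLength : Int) (c : Char) :
    fA keyU keyLength c
    = ((((PySem.List.pyRange 0 26).foldl (stepB keyU keyLength) PySem.Dict.empty).get?
          ((c.toNat : Int))).map (fun v => Char.ofNat v.toNat)).getD c := by
  have h26 : ((26 : Nat) : Int) = (26 : Int) := by norm_num
  have htab := tableGet keyU keyLength 26 (le_refl _) ((c.toNat : Int))
  rw [h26] at htab
  have hU : PySem.Chars.isupper c = true ↔ ('A' ≤ c ∧ c ≤ 'Z') := by simp [PySem.Chars.isupper]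
  have hL : PySem.Chars.islower c = true ↔ ('a' ≤ c ∧ c ≤ 'z') := by simp [PySem.Chars.islower]
  have eA : 'A'.toNat = 65 := rfl
  have eZ : 'Z'.toNat = 90 := rfl
  have ea : 'a'.toNat = 97 := rfl
  have ez : 'z'.toNat = 122 := rfl
  by_cases hu : 'A' ≤ c ∧ c ≤ 'Z'
  · have hn : 65 ≤ c.toNat ∧ c.toNat ≤ 90 := by
      have h1 := (char_le_iff 'A' c).mp hu.1
      have h2 := (char_le_iff c 'Z').mp hu.2
      rw [eA] at h1; rw [eZ] at h2; exact ⟨h1, h2⟩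
    have hget := htab
    rw [if_pos (by omega)] at hget
    rw [hget]
    have hiu : PySem.Chars.isupper c = true := hU.mpr hu
    have hia : PySem.Chars.isalpha c = true := by simp [PySem.Chars.isalpha, hiu]
    unfold fA
    rw [if_pos hia, if_pos hiu]
    simp only [Option.map_some, Option.getD_some]
    rw [Int.add_comm]
  · by_cases hl : 'a' ≤ c ∧ c ≤ 'z'
    · have hn : 97 ≤ c.toNat ∧ c.toNat ≤ 122 := by
        have h1 := (char_le_iff 'a' c).mp hl.1
        have h2 := (char_le_iff c 'z').mp hl.2
        rw [ea] at h1; rw [ez] at h2; exact ⟨h1, h2⟩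
      have hget := htab
      rw [if_neg (by omega), if_pos (by omega)] at hget
      rw [hget]
      have hil : PySem.Chars.islower c = true := hL.mpr hl
      have hiu : PySem.Chars.isupper c = false := by rw [← Bool.not_eq_true, hU]; exact hu
      have hia : PySem.Chars.isalpha c = true := by simp [PySem.Chars.isalpha, hil]
      unfold fA
      rw [if_pos hia, if_neg (by simp [hiu])]
      simp only [Option.map_some, Option.getD_some]
      rw [Int.add_comm]
    · have hn : c.toNat < 65 ∨ (90 < c.toNat ∧ c.toNat < 97) ∨ 122 < c.toNat := by
        by_contra h
        rcases (not_or.mp h) with ⟨h1, h2⟩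
        rcases (not_or.mp h2) with ⟨h2, h3⟩
        by_cases h90 : c.toNat ≤ 90
        · exact hu ⟨(char_le_iff 'A' c).mpr (by rw [eA]; omega), (char_le_iff c 'Z').mpr (by rw [eZ]; omega)⟩
        · exact hl ⟨(char_le_iff 'a' c).mpr (by rw [ea]; omega), (char_le_iff c 'z').mpr (by rw [ez]; omega)⟩
      have hget := htab
      rw [if_neg (by omega), if_neg (by omega)] at hget
      rw [hget]
      have hiu : PySem.Chars.isupper c = false := by rw [← Bool.not_eq_true, hU]; exact hu
      have hil : PySem.Chars.islower c = false := by rw [← Bool.not_eq_true, hL]; exact hl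
      have hia : PySem.Chars.isalpha c = false := by simp [PySem.Chars.isalpha, hiu, hil]
      unfold fA
      rw [if_neg (by simp [hia])]
      rfl

-- A's append loop is a map of fA
lemma loopA (keyU : List Char) (keyLength : Int) (l : List Char) :
    l.foldl (fun result char =>
      if PySem.Chars.isalpha char then
        if PySem.Chars.isupper char then
          result ++ [Char.ofNat ((PySem.Int.mod ((char.toNat : Int) - 65 -
            (((PySem.List.pyGetD keyU (PySem.Int.mod ((char.toNat : Int) - 65) keyLength) 'A').toNat : Int) - 65)) 26) + 65).toNat]
        else
          result ++ [Char.ofNat ((PySem.Int.mod ((char.toNat : Int) - 97 -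
            (((PySem.List.pyGetD keyU (PySem.Int.mod ((char.toNat : Int) - 97) keyLength) 'A').toNat : Int) - 97)) 26) + 97).toNat]
      else result ++ [char]) []
    = l.map (fA keyU keyLength) := by
  have hbody : (fun (result : List Char) char =>
      if PySem.Chars.isalpha char then
        if PySem.Chars.isupper char then
          result ++ [Char.ofNat ((PySem.Int.mod ((char.toNat : Int) - 65 -
            (((PySem.List.pyGetD keyU (PySem.Int.mod ((char.toNat : Int) - 65) keyLength) 'A').toNat : Int) - 65)) 26) + 65).toNat]
        else
          result ++ [Char.ofNat ((PySem.Int.mod ((char.toNat : Int) - 97 -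
            (((PySem.List.pyGetD keyU (PySem.Int.mod ((char.toNat : Int) - 97) keyLength) 'A').toNat : Int) - 97)) 26) + 97).toNat]
      else result ++ [char])
      = (fun result char => result ++ [fA keyU keyLength char]) := by
    funext result char
    unfold fA SS
    split_ifs <;> rfl
  rw [hbody, PySem.List.foldl_append_singleton_eq_map]
  rfl

-- ===== VERDICT =====
theorem keyword_decipher_spec : Claim_equal_keyword_decipher := by
  intro text key _hdom _hpre
  unfold Spec_keyword_decipher keyword_decipher keyword_decipher_alt
  by_cases h : text.toList = [] ∨ key.toList = []
  · rw [if_pos h, if_pos h]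
  · rw [if_neg h, if_neg h]
    simp only
    rw [loopA (PySem.Chars.upper key.toList) (key.toList.length : Int) text.toList]
    have hfun : (fun (d : PySem.Dict Int Int) (i : Int) =>
        let s : Int := ((PySem.List.pyGetD (PySem.Chars.upper key.toList)
          (PySem.Int.mod i (key.toList.length : Int)) 'A').toNat : Int)
        (d.insert (65 + i) (65 + PySem.Int.mod (i - (s - 65)) 26)).insert
          (97 + i) (97 + PySem.Int.mod (i - (s - 97)) 26))
        = stepB (PySem.Chars.upper key.toList) (key.toList.length : Int) := by
      funext d i; rfl
    rw [hfun]
    refine congrArg String.mk ?_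
    apply List.map_congr_left
    intro c _
    exact perChar (PySem.Chars.upper key.toList) (key.toList.length : Int) c
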